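-- pv_equiv track=rewrite | github.com/Senarc-Studios/Cool-Utils | cool_utils/compile.py | all_possible_cases
-- ===== SOURCE A (Python) =====
-- import itertools
--
-- def all_possible_cases(
-- 		text: str
-- ):
-- 	results = []
-- 	for x in itertools.product(*zip(text.upper(), text.lower())):
-- 		first = "".join(x)
-- 		results.append(first)
-- 	return results
-- ===== SOURCE B (Python) =====
-- def all_possible_cases(text: str):
--     U, L = text.upper(), text.lower()
--     n = len(text)
--     out = []
--     for mask in range(1 << n):
--         out.append("".join(L[j] if (mask >> (n - 1 - j)) & 1 else U[j] for j in range(n)))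
--     return out
-- ===== Notes on version B (the rewrite author's own statement) =====
-- stated objective: alternative
-- what changed: B drops itertools.product entirely and computes each output string directly from an integer bitmask 0..2^n-1, selecting the lowercase letter at position j when bit n-1-j of the mask is set (closed-form indexing instead of product enumeration).
import Mathlib
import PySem

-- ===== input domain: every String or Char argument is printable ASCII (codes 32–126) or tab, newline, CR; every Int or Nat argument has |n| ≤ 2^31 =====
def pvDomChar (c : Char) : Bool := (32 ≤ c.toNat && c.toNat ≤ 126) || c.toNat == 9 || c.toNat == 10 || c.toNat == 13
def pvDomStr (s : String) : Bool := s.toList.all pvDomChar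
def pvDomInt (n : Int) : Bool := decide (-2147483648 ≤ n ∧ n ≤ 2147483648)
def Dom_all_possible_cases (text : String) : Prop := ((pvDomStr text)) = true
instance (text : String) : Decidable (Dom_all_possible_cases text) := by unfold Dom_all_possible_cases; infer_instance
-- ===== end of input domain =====

-- B replaces itertools.product by direct bitmask indexing: the k-th result is computed
-- from the bits of k, no product enumeration (alternative algorithm, same asymptotic cost).

-- ===== PORT A =====
-- itertools.product(*pairs) where each pair (u, l) contributes the iterable (u, l):
-- tuples in lexicographic order, first position slowest; exact hand port of product.
def pvProdA : List (Char × Char) → List (List Char)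
  | [] => [[]]
  | (u, l) :: rest => [u, l].flatMap (fun c => (pvProdA rest).map (fun t => c :: t))

def all_possible_cases (text : String) : List String :=
  let pairs := List.zip (PySem.Str.upper text).toList (PySem.Str.lower text).toList
  -- for x in product(...): results.append("".join(x))
  (pvProdA pairs).map (fun x => String.ofList x)

-- ===== PORT B =====
def all_possible_cases_alt (text : String) : List String :=
  -- U, L = text.upper(), text.lower(); n = len(text)
  let U := (PySem.Str.upper text).toList
  let L := (PySem.Str.lower text).toList
  let n := text.toList.length
  -- for mask in range(1 << n): "".join(L[j] if (mask >> (n-1-j)) & 1 else U[j] for j in range(n))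
  (List.range (1 <<< n)).map (fun mask =>
    String.ofList ((List.range n).map (fun j =>
      if (mask >>> (n - 1 - j)) &&& 1 == 1 then L.getD j ' ' else U.getD j ' ')))

-- ===== PRECONDITION & SPEC =====
def Spec_all_possible_cases (text : String) (out : List String) : Prop := out = all_possible_cases_alt text
instance (text : String) (out : List String) : Decidable (Spec_all_possible_cases text out) := by unfold Spec_all_possible_cases; infer_instance

-- ===== CLAIM (what is proved, stated in full; the proofs are below) =====
def Claim_equal_all_possible_cases : Prop := ∀ (text : String), Dom_all_possible_cases text → Spec_all_possible_cases text (all_possible_cases text)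

-- ===== LEMMAS AND PROOFS =====

-- bit extraction as the port writes it, in arithmetic form
theorem pvBit_eq (m k : ℕ) : ((m >>> k) &&& 1 == 1) = (m / 2 ^ k % 2 == 1) := by
  rw [Nat.shiftRight_eq_div_pow, Nat.and_one_is_mod]

-- low bits of 2^n + m agree with those of m
theorem pvBit_add_pow (n k m : ℕ) (hk : k < n) :
    (2 ^ n + m) / 2 ^ k % 2 = m / 2 ^ k % 2 := by
  have h : 2 ^ n = 2 * 2 ^ (n - k - 1) * 2 ^ k := by
    rw [← pow_succ', ← pow_add]
    congr 1
    omega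
  rw [h, Nat.add_comm, Nat.add_mul_div_right _ _ (Nat.two_pow_pos k),
      Nat.add_mul_mod_self_left]

-- the product of the (upper, lower) pairs, enumerated by bitmask
theorem pvProd_eq_range (U : List Char) :
    ∀ (L : List Char), U.length = L.length →
    pvProdA (U.zip L)
      = (List.range (2 ^ U.length)).map (fun mask =>
          (List.range U.length).map (fun j =>
            if (mask >>> (U.length - 1 - j)) &&& 1 == 1 then L.getD j ' ' else U.getD j ' ')) := by
  induction U with
  | nil =>
    intro L h
    simp [pvProdA]
  | cons u U ih =>
    intro L h
    match L with
    | l :: L =>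
      have hlen : U.length = L.length := by simpa using h
      have hn : 2 ^ (u :: U).length = 2 ^ U.length + 2 ^ U.length := by
        simp [pow_succ]; ring
      rw [hn, List.range_add, List.map_append, List.map_map]
      have hprod : pvProdA ((u :: U).zip (l :: L))
          = ((pvProdA (U.zip L)).map (fun t => u :: t))
            ++ ((pvProdA (U.zip L)).map (fun t => l :: t)) := by
        simp [pvProdA, List.flatMap]
      rw [hprod, ih L hlen, List.map_map, List.map_map]
      congr 1
      · -- first half: masks < 2^U.length, top bit 0 → uppercase head
        apply List.map_congr_left
        intro m hm
        have hm' : m < 2 ^ U.length := List.mem_range.mp hm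
        simp only [Function.comp]
        rw [List.length_cons, List.range_succ_eq_map, List.map_cons, List.map_map]
        congr 1
        · have hz : U.length + 1 - 1 - 0 = U.length := by omega
          rw [hz, pvBit_eq, Nat.div_eq_of_lt hm']
          simp
        · apply List.map_congr_left
          intro j hj
          simp only [Function.comp]
          have harg : U.length + 1 - 1 - j.succ = U.length - 1 - j := by omega
          rw [harg]
          simp
      · -- second half: masks 2^U.length + m, top bit 1 → lowercase head
        apply List.map_congr_left
        intro m hm
        have hm' : m < 2 ^ U.length := List.mem_range.mp hm
        simp only [Function.comp]
        rw [List.length_cons, List.range_succ_eq_map, List.map_cons, List.map_map]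
        congr 1
        · have hz : U.length + 1 - 1 - 0 = U.length := by omega
          have hdiv : (2 ^ U.length + m) / 2 ^ U.length = 1 := by
            rw [Nat.add_comm, Nat.add_div_right _ (Nat.two_pow_pos _),
                Nat.div_eq_of_lt hm']
          rw [hz, pvBit_eq, hdiv]
          simp
        · apply List.map_congr_left
          intro j hj
          have hj' : j < U.length := List.mem_range.mp hj
          simp only [Function.comp]
          have harg : U.length + 1 - 1 - j.succ = U.length - 1 - j := by omega
          rw [harg, pvBit_eq, pvBit_eq, pvBit_add_pow _ _ _ (by omega)]
          simp

-- ===== VERDICT (by name: the statement is the Claim_ definition above) =====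
theorem all_possible_cases_spec : Claim_equal_all_possible_cases := by
  intro text _
  show all_possible_cases text = all_possible_cases_alt text
  simp only [all_possible_cases, all_possible_cases_alt,
    PySem.Str.toList_upper, PySem.Str.toList_lower, PySem.Chars.upper, PySem.Chars.lower]
  rw [pvProd_eq_range _ _ (by simp)]
  rw [Nat.one_shiftLeft, List.length_map, List.map_map]
  rfl
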